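-- pv_equiv track=rewrite | github.com/AssiaHristova/SoftUni-Software-Engineering | Python Advanced/multidimensional_lists/radioactive_mutate_vampire_bunnies.py | bunnies_spread
-- ===== SOURCE A (Python) =====
-- def bunnies_spread(matrix):
--     bunnies = []
--     for r in range(len(matrix)):
--         for c in range(len(matrix[r])):
--             if matrix[r][c] == 'B':
--                 bunnies.append([r, c])
--     for bunnie in bunnies:
--         for r in range(len(matrix)):
--             for c in range(len(matrix[r])):
--                 if [r, c] == bunnie:
--                     if r + 1 in range(len(matrix)):
--                         matrix[r + 1][c] = 'B'
--                     if r - 1 in range(len(matrix)):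
--                         matrix[r - 1][c] = 'B'
--                     if c + 1 in range(len(matrix[0])):
--                         matrix[r][c + 1] = 'B'
--                     if c + 1 in range(len(matrix[0])):
--                         matrix[r][c - 1] = 'B'
--                     break
--     return matrix
-- ===== SOURCE B (Python) =====
-- def bunnies_spread(matrix):
--     # Spread each bunny directly from its stored coordinates -- no rescan of the
--     # whole matrix per bunny.  Keeps the original's exact neighbour rule: the
--     # left/right spread is guarded by len(matrix[0]), and the left write
--     # matrix[r][c-1] wraps to the end of the row when c == 0.
--     # Mutates `matrix` in place, like the original.
--     rows = len(matrix)
--     bunnies = [(r, c) for r, row in enumerate(matrix) for c, v in enumerate(row) if v == 'B']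
--     for r, c in bunnies:
--         if r + 1 < rows:
--             matrix[r + 1][c] = 'B'
--         if r >= 1:
--             matrix[r - 1][c] = 'B'
--         if c + 1 < len(matrix[0]):
--             matrix[r][c + 1] = 'B'
--             matrix[r][c - 1] = 'B'
--     return matrix
-- ===== Notes on version B (the rewrite author's own statement) =====
-- stated objective: alternative
-- what changed: B collects the bunny coordinates with a single enumerate comprehension and applies the four neighbour writes directly at each stored coordinate, removing A's per-bunny rescan of the whole matrix (O(R*C) per bunny) that only re-locates a coordinate it already stored; Pre_ excludes exactly the ragged matrices on which a neighbour write falls past the end of a shorter row and A (and B) raise IndexError.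
import Mathlib
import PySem

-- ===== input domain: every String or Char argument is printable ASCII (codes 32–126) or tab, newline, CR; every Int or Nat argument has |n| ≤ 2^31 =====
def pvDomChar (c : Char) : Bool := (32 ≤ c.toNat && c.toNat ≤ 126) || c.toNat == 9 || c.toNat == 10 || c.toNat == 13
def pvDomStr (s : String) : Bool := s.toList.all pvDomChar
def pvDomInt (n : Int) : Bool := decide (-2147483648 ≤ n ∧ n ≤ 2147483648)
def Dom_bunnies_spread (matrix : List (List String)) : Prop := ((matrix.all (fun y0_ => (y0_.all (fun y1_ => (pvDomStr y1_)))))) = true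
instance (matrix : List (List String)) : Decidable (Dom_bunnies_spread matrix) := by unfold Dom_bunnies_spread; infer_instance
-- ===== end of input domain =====

-- B applies the same neighbour writes directly at each stored bunny coordinate instead of rescanning
-- the whole matrix to re-locate every bunny; both Pythons mutate `matrix` in place and return it, and
-- the equivalence proved here is about that returned value.

-- ===== PORT A =====
-- matrix[x][y] = 'B'  (pySetD is Python-exact list assignment incl. negative index; in range under Pre_)
def pvPut (m : List (List String)) (x y : Int) : List (List String) :=
  PySem.List.pySetD m x (PySem.List.pySetD (PySem.List.pyGetD m x []) y "B")

-- A's first loop nest: collect the coordinates of all 'B' cells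
def pvBunniesA (matrix : List (List String)) : List (Int × Int) :=
  (PySem.List.pyRange 0 (PySem.List.len matrix) 1).foldl (fun acc r =>
    (PySem.List.pyRange 0 (PySem.List.len (PySem.List.pyGetD matrix r [])) 1).foldl (fun acc c =>
      if PySem.List.pyGetD (PySem.List.pyGetD matrix r []) c "" = "B" then acc ++ [(r, c)] else acc) acc) []

-- the four guarded writes A performs once the bunny is re-found at (r, c)
def pvWritesA (m : List (List String)) (r c : Int) : List (List String) :=
  let m1 := if 0 ≤ r + 1 ∧ r + 1 < PySem.List.len m then pvPut m (r + 1) c else m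
  let m2 := if 0 ≤ r - 1 ∧ r - 1 < PySem.List.len m1 then pvPut m1 (r - 1) c else m1
  let m3 := if 0 ≤ c + 1 ∧ c + 1 < PySem.List.len (PySem.List.pyGetD m2 0 []) then pvPut m2 r (c + 1) else m2
  if 0 ≤ c + 1 ∧ c + 1 < PySem.List.len (PySem.List.pyGetD m3 0 []) then pvPut m3 r (c - 1) else m3

-- A's rescan of the whole matrix for one stored bunny ('[r, c] == bunnie' → the writes → break)
def pvScanA (m : List (List String)) (bR bC : Int) : List (List String) :=
  (PySem.List.pyRange 0 (PySem.List.len m) 1).foldl (fun acc r =>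
    match (PySem.List.pyRange 0 (PySem.List.len (PySem.List.pyGetD acc r [])) 1).find?
            (fun c => r == bR && c == bC) with
    | some c => pvWritesA acc r c
    | none => acc) m

def bunnies_spread (matrix : List (List String)) : List (List String) :=
  (pvBunniesA matrix).foldl (fun m b => pvScanA m b.1 b.2) matrix

-- ===== PORT B =====
-- B's comprehension: [(r, c) for r, row in enumerate(matrix) for c, v in enumerate(row) if v == 'B']
def pvBunniesB (matrix : List (List String)) : List (Int × Int) :=
  (PySem.List.enumerate matrix).flatMap (fun p =>
    ((PySem.List.enumerate p.2).filter (fun q => q.2 == "B")).map (fun q => (p.1, q.1)))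

def bunnies_spread_alt (matrix : List (List String)) : List (List String) :=
  (pvBunniesB matrix).foldl (fun m b =>
    let m1 := if b.1 + 1 < PySem.List.len m then pvPut m (b.1 + 1) b.2 else m
    let m2 := if 1 ≤ b.1 then pvPut m1 (b.1 - 1) b.2 else m1
    if b.2 + 1 < PySem.List.len (PySem.List.pyGetD m2 0 [])
      then pvPut (pvPut m2 b.1 (b.2 + 1)) b.1 (b.2 - 1) else m2) matrix

-- ===== PRECONDITION & SPEC =====
-- Pre_ holds exactly when every neighbour write lands inside its target row, i.e. exactly when the
-- Python A returns normally; on the excluded (ragged) inputs A raises IndexError (and so does B).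
def Pre_bunnies_spread (matrix : List (List String)) : Prop :=
  ∀ r ∈ List.range matrix.length, ∀ c ∈ List.range (matrix.getD r []).length,
    (matrix.getD r []).getD c "" = "B" →
    (r + 1 < matrix.length → c < (matrix.getD (r + 1) []).length) ∧
    (1 ≤ r → c < (matrix.getD (r - 1) []).length) ∧
    (c + 1 < (matrix.getD 0 []).length → c + 1 < (matrix.getD r []).length)
instance (matrix : List (List String)) : Decidable (Pre_bunnies_spread matrix) := by
  unfold Pre_bunnies_spread; infer_instance
def pvWitness_bunnies_spread : List (List String) := [[".", "B"], [".", "."]]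

def Spec_bunnies_spread (matrix : List (List String)) (out : List (List String)) : Prop :=
  out = bunnies_spread_alt matrix
instance (matrix : List (List String)) (out : List (List String)) : Decidable (Spec_bunnies_spread matrix out) := by
  unfold Spec_bunnies_spread; infer_instance

-- ===== CLAIM (what is proved, stated in full; the proofs are below) =====
def Claim_equal_bunnies_spread : Prop := ∀ (matrix : List (List String)), Dom_bunnies_spread matrix → Pre_bunnies_spread matrix → Spec_bunnies_spread matrix (bunnies_spread matrix)

-- ===== LEMMAS AND PROOFS =====

def pvCoords (matrix : List (List String)) : List (Int × Int) :=
  (List.range matrix.length).flatMap (fun (r : Nat) =>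
    (((List.range (matrix.getD r []).length)).filter
        (fun c => (matrix.getD r []).getD c "" == "B")).map (fun (c : Nat) => ((r : Int), (c : Int))))

lemma set_self_of_getD {α : Type} [Inhabited α] (l : List α) (i : Nat) (v : α)
    (h : l.getD i default = v) : l.set i v = l := by
  induction l generalizing i with
  | nil => rfl
  | cons a l ih =>
    cases i with
    | zero => simp_all [List.getD]
    | succ n => simp_all [List.getD, List.set]

lemma pyIdx?_lt (n : Nat) (i : Int) (k : Nat) (h : PySem.List.pyIdx? n i = some k) : k < n := by
  unfold PySem.List.pyIdx? at h
  split_ifs at h <;> simp_all <;> omega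

lemma pvPut_cases (m : List (List String)) (x y : Int) :
    pvPut m x y = m ∨ ∃ r c : Nat, r < m.length ∧ c < (m.getD r []).length ∧
      pvPut m x y = m.set r ((m.getD r []).set c "B") := by
  unfold pvPut
  rcases hI : PySem.List.pyIdx? m.length x with _ | r
  · left
    simp [PySem.List.pySetD, PySem.List.pySet?, hI]
  · have hr : r < m.length := pyIdx?_lt _ _ _ hI
    have hrow : PySem.List.pyGetD m x [] = m.getD r [] := by
      simp [PySem.List.pyGetD, PySem.List.pyGet?, hI, List.getD_eq_getElem?_getD]
    rw [hrow]
    have houter : ∀ v, PySem.List.pySetD m x v = m.set r v := by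
      intro v; simp [PySem.List.pySetD, PySem.List.pySet?, hI]
    rcases hJ : PySem.List.pyIdx? (m.getD r []).length y with _ | c
    · left
      rw [houter]
      simp only [PySem.List.pySetD, PySem.List.pySet?, hJ, Option.map_none, Option.getD_none]
      exact set_self_of_getD _ _ _ rfl
    · right
      refine ⟨r, c, hr, pyIdx?_lt _ _ _ hJ, ?_⟩
      rw [houter]
      simp only [List.getD_eq_getElem?_getD] at hJ ⊢
      simp only [PySem.List.pySetD, PySem.List.pySet?, hJ, Option.map_some, Option.getD_some]

lemma getD_set_row (m : List (List String)) (r : Nat) (v : List String) (i : Nat) :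
    (m.set r v).getD i [] = if r = i ∧ r < m.length then v else m.getD i [] := by
  simp only [List.getD_eq_getElem?_getD, List.getElem?_set]
  split_ifs with h1 h2 h3 h4 <;> simp_all
  omega

lemma rowlen_pvPut (m : List (List String)) (x y : Int) (i : Nat) :
    ((pvPut m x y).getD i []).length = (m.getD i []).length := by
  rcases pvPut_cases m x y with h | ⟨r, c, hr, hc, h⟩ <;> rw [h]
  rw [getD_set_row]
  split_ifs with h1
  · rw [← h1.1, List.length_set]
  · rfl

lemma length_pvPut (m : List (List String)) (x y : Int) : (pvPut m x y).length = m.length := by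
  simp [pvPut, PySem.List.length_pySetD]

lemma length_ite (b : Prop) [Decidable b] (m : List (List String)) (x y : Int) :
    (if b then pvPut m x y else m).length = m.length := by
  split_ifs
  · exact length_pvPut m x y
  · rfl

lemma foldl_flatMap_of {α β : Type} (f : List β → α → List β) (g : α → List β) (l : List α)
    (h : ∀ acc, ∀ x ∈ l, f acc x = acc ++ g x) (init : List β) :
    l.foldl f init = init ++ l.flatMap g :=
  (PySem.List.foldl_congr_mem _ _ _ _ h).trans (PySem.List.foldl_append_eq_flatMap g l init)

lemma pvBunniesA_eq (matrix : List (List String)) : pvBunniesA matrix = pvCoords matrix := by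
  unfold pvBunniesA pvCoords
  rw [PySem.List.len_eq, PySem.List.pyRange_zero_natCast, List.foldl_map]
  refine foldl_flatMap_of _ _ _ ?_ []
  intro acc r hr
  have hg : PySem.List.pyGetD matrix (r : Int) [] = matrix.getD r [] := by
    simp [List.getD_eq_getElem?_getD]
  rw [hg, PySem.List.len_eq, PySem.List.pyRange_zero_natCast, List.foldl_map]
  refine ((PySem.List.foldl_congr_mem _ _ _ _ ?_).trans
    (PySem.List.foldl_append_if (fun c => (matrix.getD r []).getD c "" == "B")
      (fun (c : Nat) => ((r : Int), (c : Int))) (List.range (matrix.getD r []).length) acc))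
  intro acc c hc
  have : PySem.List.pyGetD (matrix.getD r []) (c : Int) "" = (matrix.getD r []).getD c "" := by
    simp [List.getD_eq_getElem?_getD]
  rw [this]
  simp

lemma pvBunniesB_eq (matrix : List (List String)) : pvBunniesB matrix = pvCoords matrix := by
  unfold pvBunniesB pvCoords
  rw [PySem.List.enumerate_eq_map_pyRange matrix [], PySem.List.len_eq,
    PySem.List.pyRange_zero_natCast, List.map_map, List.flatMap_map]
  refine congrFun (congrArg List.flatMap ?_) _
  funext rn
  have hg : PySem.List.pyGetD matrix (rn : Int) [] = matrix.getD rn [] := by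
    simp [List.getD_eq_getElem?_getD]
  simp only [Function.comp_apply, hg]
  rw [PySem.List.enumerate_eq_map_pyRange (matrix.getD rn []) "", PySem.List.len_eq,
    PySem.List.pyRange_zero_natCast, List.map_map, List.filter_map, List.map_map]
  rw [List.filter_congr (q := fun (c : Nat) => (matrix.getD rn []).getD c "" == "B")]
  · rfl
  · intro c _
    simp [Function.comp, List.getD_eq_getElem?_getD]

lemma mem_pvCoords (matrix : List (List String)) (p : Int × Int) (h : p ∈ pvCoords matrix) :
    ∃ r c : Nat, p = ((r : Int), (c : Int)) ∧ r < matrix.length ∧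
      c < (matrix.getD r []).length ∧ (matrix.getD r []).getD c "" = "B" := by
  unfold pvCoords at h
  rw [List.mem_flatMap] at h
  obtain ⟨r, hr, hp⟩ := h
  rw [List.mem_map] at hp
  obtain ⟨c, hc, rfl⟩ := hp
  rw [List.mem_filter] at hc
  exact ⟨r, c, rfl, List.mem_range.mp hr, List.mem_range.mp hc.1, by simpa using hc.2⟩

lemma find?_beq_range' (bC : Nat) : ∀ (n s : Nat), s ≤ bC → bC < s + n →
    (List.range' s n).find? (fun c => c == bC) = some bC := by
  intro n
  induction n with
  | zero => omega
  | succ k ih =>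
    intro s h1 h2
    rw [List.range'_succ, List.find?_cons]
    by_cases hs : s = bC
    · subst hs; simp
    · have : (s == bC) = false := by simp [hs]
      rw [this]
      exact ih (s + 1) (by omega) (by omega)

lemma pvStep_ne (bR bC : Nat) (acc : List (List String)) (r : Nat) (hne : r ≠ bR) :
    (match (PySem.List.pyRange 0 (PySem.List.len (PySem.List.pyGetD acc (r : Int) [])) 1).find?
            (fun c => (r : Int) == (bR : Int) && c == (bC : Int)) with
     | some c => pvWritesA acc (r : Int) c
     | none => acc) = acc := by
  have : (PySem.List.pyRange 0 (PySem.List.len (PySem.List.pyGetD acc (r : Int) [])) 1).find?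
      (fun c => (r : Int) == (bR : Int) && c == (bC : Int)) = none := by
    rw [List.find?_eq_none]
    intro x _
    simp [hne]
  rw [this]

lemma pvStep_eq (bR bC : Nat) (acc : List (List String)) (hc : bC < (acc.getD bR []).length) :
    (match (PySem.List.pyRange 0 (PySem.List.len (PySem.List.pyGetD acc (bR : Int) [])) 1).find?
            (fun c => (bR : Int) == (bR : Int) && c == (bC : Int)) with
     | some c => pvWritesA acc (bR : Int) c
     | none => acc) = pvWritesA acc (bR : Int) (bC : Int) := by
  have hg : PySem.List.pyGetD acc (bR : Int) [] = acc.getD bR [] := by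
    simp [List.getD_eq_getElem?_getD]
  rw [hg, PySem.List.len_eq, PySem.List.pyRange_zero_natCast, List.find?_map]
  have hpred : ((fun c => (bR : Int) == (bR : Int) && c == (bC : Int)) ∘ (fun (k : Nat) => (k : Int)))
      = fun (c : Nat) => c == bC := by
    funext c
    simp [Function.comp]
  rw [hpred]
  have hf : (List.range (acc.getD bR []).length).find? (fun c => c == bC) = some bC := by
    rw [List.range_eq_range']
    exact find?_beq_range' bC _ 0 (by omega) (by omega)
  rw [hf]
  rfl

lemma pvScan_fold_id (bR bC : Nat) : ∀ (l : List Nat) (m : List (List String)), (∀ r ∈ l, r ≠ bR) →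
    l.foldl (fun acc (r : Nat) =>
      match (PySem.List.pyRange 0 (PySem.List.len (PySem.List.pyGetD acc (r : Int) [])) 1).find?
              (fun c => (r : Int) == (bR : Int) && c == (bC : Int)) with
       | some c => pvWritesA acc (r : Int) c
       | none => acc) m = m := by
  intro l
  induction l with
  | nil => intro m _; rfl
  | cons a l ih =>
    intro m h
    rw [List.foldl_cons, pvStep_ne bR bC m a (h a (by simp))]
    exact ih m (fun r hr => h r (by simp [hr]))

lemma pvScan_fold (bR bC : Nat) : ∀ (n s : Nat) (m : List (List String)), s ≤ bR → bR < s + n →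
    bC < (m.getD bR []).length →
    (List.range' s n).foldl (fun acc (r : Nat) =>
      match (PySem.List.pyRange 0 (PySem.List.len (PySem.List.pyGetD acc (r : Int) [])) 1).find?
              (fun c => (r : Int) == (bR : Int) && c == (bC : Int)) with
       | some c => pvWritesA acc (r : Int) c
       | none => acc) m = pvWritesA m (bR : Int) (bC : Int) := by
  intro n
  induction n with
  | zero => intro s m h1 h2; omega
  | succ k ih =>
    intro s m h1 h2 hc
    rw [List.range'_succ, List.foldl_cons]
    by_cases hs : s = bR
    · subst hs
      rw [pvStep_eq s bC m hc]
      exact pvScan_fold_id s bC _ _ (fun r hr => by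
        have := List.mem_range'_1.mp hr; omega)
    · rw [pvStep_ne bR bC m s hs]
      exact ih (s + 1) m (by omega) (by omega) hc

lemma pvScanA_eq (m : List (List String)) (bR bC : Nat)
    (hr : bR < m.length) (hc : bC < (m.getD bR []).length) :
    pvScanA m (bR : Int) (bC : Int) = pvWritesA m (bR : Int) (bC : Int) := by
  unfold pvScanA
  rw [PySem.List.len_eq, PySem.List.pyRange_zero_natCast, List.foldl_map, List.range_eq_range']
  exact pvScan_fold bR bC m.length 0 m (by omega) (by omega) hc

lemma pvWrites_eq (m : List (List String)) (r c : Nat) (hr : r < m.length) :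
    pvWritesA m (r : Int) (c : Int) =
      (let m1 := if (r : Int) + 1 < PySem.List.len m then pvPut m ((r : Int) + 1) (c : Int) else m
       let m2 := if 1 ≤ (r : Int) then pvPut m1 ((r : Int) - 1) (c : Int) else m1
       if (c : Int) + 1 < PySem.List.len (PySem.List.pyGetD m2 0 [])
         then pvPut (pvPut m2 (r : Int) ((c : Int) + 1)) (r : Int) ((c : Int) - 1) else m2) := by
  unfold pvWritesA
  have e1 : (0 ≤ (r : Int) + 1 ∧ (r : Int) + 1 < PySem.List.len m) ↔ ((r : Int) + 1 < PySem.List.len m) := by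
    rw [PySem.List.len_eq]; omega
  simp only [e1]
  set m1 := if (r : Int) + 1 < PySem.List.len m then pvPut m ((r : Int) + 1) (c : Int) else m with hm1
  have hlen1 : m1.length = m.length := by rw [hm1, length_ite]
  have e2 : (0 ≤ (r : Int) - 1 ∧ (r : Int) - 1 < PySem.List.len m1) ↔ (1 ≤ (r : Int)) := by
    rw [PySem.List.len_eq, hlen1]; omega
  simp only [e2]
  set m2 := if 1 ≤ (r : Int) then pvPut m1 ((r : Int) - 1) (c : Int) else m1 with hm2
  have e3 : (0 ≤ (c : Int) + 1 ∧ (c : Int) + 1 < PySem.List.len (PySem.List.pyGetD m2 0 [])) ↔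
      ((c : Int) + 1 < PySem.List.len (PySem.List.pyGetD m2 0 [])) := by
    rw [PySem.List.len_eq]; omega
  simp only [e3]
  by_cases h3 : (c : Int) + 1 < PySem.List.len (PySem.List.pyGetD m2 0 [])
  · rw [if_pos h3, if_pos h3]
    have h4 : (0 ≤ (c : Int) + 1 ∧ (c : Int) + 1 <
        PySem.List.len (PySem.List.pyGetD (pvPut m2 (r : Int) ((c : Int) + 1)) 0 [])) := by
      constructor
      · omega
      · rw [PySem.List.pyGetD_zero, PySem.List.len_eq, rowlen_pvPut,
          ← PySem.List.len_eq, ← PySem.List.pyGetD_zero]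
        exact h3
    rw [if_pos h4]
  · rw [if_neg h3, if_neg h3]
    have h4 : ¬ (0 ≤ (c : Int) + 1 ∧ (c : Int) + 1 < PySem.List.len (PySem.List.pyGetD m2 0 [])) := by
      intro h; exact h3 h.2
    rw [if_neg h4]

lemma pvMain (matrix : List (List String)) :
    ∀ (bs : List (Int × Int)) (m : List (List String)),
    (∀ p ∈ bs, ∃ r c : Nat, p = ((r : Int), (c : Int)) ∧ r < matrix.length ∧
      c < (matrix.getD r []).length ∧ (matrix.getD r []).getD c "" = "B") →
    m.length = matrix.length →
    (∀ i : Nat, (m.getD i []).length = (matrix.getD i []).length) →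
    bs.foldl (fun m b => pvScanA m b.1 b.2) m =
      bs.foldl (fun m b =>
        let m1 := if b.1 + 1 < PySem.List.len m then pvPut m (b.1 + 1) b.2 else m
        let m2 := if 1 ≤ b.1 then pvPut m1 (b.1 - 1) b.2 else m1
        if b.2 + 1 < PySem.List.len (PySem.List.pyGetD m2 0 [])
          then pvPut (pvPut m2 b.1 (b.2 + 1)) b.1 (b.2 - 1) else m2) m := by
  intro bs
  induction bs with
  | nil => intro m _ _ _; rfl
  | cons p bs ih =>
    intro m hbs hlen hrow
    obtain ⟨r, c, rfl, hr, hc, hcell⟩ := hbs p (by simp)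
    rw [List.foldl_cons, List.foldl_cons]
    have hscan : pvScanA m (r : Int) (c : Int) = pvWritesA m (r : Int) (c : Int) :=
      pvScanA_eq m r c (by omega) (by rw [hrow r]; exact hc)
    have hw := pvWrites_eq m r c (by omega)
    show bs.foldl _ (pvScanA m (r : Int) (c : Int)) = bs.foldl _ _
    rw [hscan, hw]
    set m' := (let m1 := if (r : Int) + 1 < PySem.List.len m then pvPut m ((r : Int) + 1) (c : Int) else m
       let m2 := if 1 ≤ (r : Int) then pvPut m1 ((r : Int) - 1) (c : Int) else m1
       if (c : Int) + 1 < PySem.List.len (PySem.List.pyGetD m2 0 [])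
         then pvPut (pvPut m2 (r : Int) ((c : Int) + 1)) (r : Int) ((c : Int) - 1) else m2) with hm'
    have hlen' : m'.length = matrix.length := by
      rw [hm']
      simp only []
      split_ifs <;> simp only [length_pvPut, hlen]
    have hrow' : ∀ i : Nat, (m'.getD i []).length = (matrix.getD i []).length := by
      intro i
      rw [hm']
      simp only []
      split_ifs <;> simp only [rowlen_pvPut, hrow]
    exact ih m' (fun q hq => hbs q (by simp [hq])) hlen' hrow'

-- ===== VERDICT (by name: the statement is the Claim_ definition above) =====
theorem bunnies_spread_spec : Claim_equal_bunnies_spread := by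
  intro matrix _ _
  unfold Spec_bunnies_spread
  unfold bunnies_spread bunnies_spread_alt
  rw [pvBunniesA_eq, pvBunniesB_eq]
  exact pvMain matrix (pvCoords matrix) matrix (mem_pvCoords matrix) rfl (fun i => rfl)
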